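-- pv_equiv track=rewrite | github.com/clean-code-craft-tcq-4/tdd-buckets-d6fb7f0c-RajeshwariSubramaniam | src/charging_current_ranges.py | input_for_consecutive_check
-- ===== SOURCE A (Python) =====
-- def input_for_consecutive_check(current_readings):
--     value = []
--     for i in range(min(current_readings), max(current_readings)+1):
--         if i in current_readings:
--             value.append(i)
--             continue
--         value.append(0)
--     return value
-- ===== SOURCE B (Python) =====
-- def input_for_consecutive_check(current_readings):
--     lo = min(current_readings)
--     hi = max(current_readings)
--     result = [0] * (hi - lo + 1)
--     for r in current_readings:
--         result[r - lo] = r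
--     return result
-- ===== Notes on version B (the rewrite author's own statement) =====
-- stated objective: faster
-- what changed: Replaces the scan over the whole value range with a per-slot membership test (O(range*n)) by a single scatter pass: allocate [0]*(hi-lo+1) once and index-assign each reading into its slot, no membership test or branch remains.
import Mathlib
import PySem

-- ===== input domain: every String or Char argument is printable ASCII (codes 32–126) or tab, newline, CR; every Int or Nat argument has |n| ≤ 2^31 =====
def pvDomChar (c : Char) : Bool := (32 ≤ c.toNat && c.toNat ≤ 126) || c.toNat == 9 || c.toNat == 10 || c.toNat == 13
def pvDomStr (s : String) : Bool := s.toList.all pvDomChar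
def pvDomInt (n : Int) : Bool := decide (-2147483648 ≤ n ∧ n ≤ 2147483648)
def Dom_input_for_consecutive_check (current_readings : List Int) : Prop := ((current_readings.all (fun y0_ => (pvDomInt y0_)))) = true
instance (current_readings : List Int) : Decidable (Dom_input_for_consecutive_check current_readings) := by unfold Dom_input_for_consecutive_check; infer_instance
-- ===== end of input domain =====

-- B replaces A's range scan with a per-slot membership test by a single scatter pass
-- over the readings into a pre-allocated zero list (asymptotically fewer operations).

-- ===== PORT A =====
-- A scans range(min, max+1) and appends i when i is a reading, else 0.
def input_for_consecutive_check (current_readings : List Int) : List Int :=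
  match PySem.List.min? current_readings (fun x => x),
        PySem.List.max? current_readings (fun x => x) with
  | some lo, some hi =>
      (PySem.List.pyRange lo (hi + 1) 1).foldl
        (fun value i => if current_readings.contains i then value ++ [i] else value ++ [0]) []
  | _, _ => []  -- unreachable: Python min([]) raises ValueError; Pre_ excludes []

-- ===== PORT B =====
-- B allocates [0]*(hi-lo+1) and scatter-writes each reading r into slot r-lo.
def input_for_consecutive_check_alt (current_readings : List Int) : List Int :=
  (PySem.List.min? current_readings (fun x => x)).elim []
    (fun lo => (PySem.List.max? current_readings (fun x => x)).elim []
      (fun hi => current_readings.foldl (fun result r => result.set (r - lo).toNat r)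
        (List.replicate (hi - lo + 1).toNat 0)))
  -- the [] branches are unreachable: Python min([]) raises ValueError; Pre_ excludes []

-- ===== PRECONDITION & SPEC =====
-- Python A raises ValueError on the empty list (min([])); Pre_ excludes exactly that input.
def Pre_input_for_consecutive_check (current_readings : List Int) : Prop :=
  current_readings ≠ []
instance (current_readings : List Int) : Decidable (Pre_input_for_consecutive_check current_readings) := by unfold Pre_input_for_consecutive_check; infer_instance
def pvWitness_input_for_consecutive_check : List Int := [1, 3]

def Spec_input_for_consecutive_check (current_readings : List Int) (out : List Int) : Prop := out = input_for_consecutive_check_alt current_readings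
instance (current_readings : List Int) (out : List Int) : Decidable (Spec_input_for_consecutive_check current_readings out) := by unfold Spec_input_for_consecutive_check; infer_instance

-- ===== CLAIM (what is proved, stated in full; the proofs are below) =====
def Claim_equal_input_for_consecutive_check : Prop := ∀ (current_readings : List Int), Dom_input_for_consecutive_check current_readings → Pre_input_for_consecutive_check current_readings → Spec_input_for_consecutive_check current_readings (input_for_consecutive_check current_readings)

-- ===== LEMMAS AND PROOFS =====

-- A's loop appends one element per range point: it is a map.
theorem pvFoldlSnoc (f : Int → Int) (l : List Int) (acc : List Int) :
    l.foldl (fun v i => v ++ [f i]) acc = acc ++ l.map f := by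
  induction l generalizing acc with
  | nil => simp
  | cons x t ih => simp [List.foldl_cons, ih]

-- B's scatter loop, characterised slot by slot: slot k holds lo+k if lo+k is a
-- reading in l, else whatever the initial list held there.
theorem pvScatterGet (lo : Int) (l : List Int) (res : List Int)
    (hlo : ∀ r ∈ l, lo ≤ r) (k : Nat) (hk : k < res.length) :
    (l.foldl (fun result r => result.set (r - lo).toNat r) res)[k]? =
      if (lo + (k : Int)) ∈ l then some (lo + (k : Int)) else res[k]? := by
  induction l generalizing res with
  | nil => simp
  | cons r t ih =>
    have hrlo : lo ≤ r := hlo r (by simp)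
    have hlen : (res.set (r - lo).toNat r).length = res.length := by simp
    rw [List.foldl_cons, ih (res.set (r - lo).toNat r) (fun x hx => hlo x (by simp [hx]))
      (by rw [hlen]; exact hk)]
    by_cases hmem : (lo + (k : Int)) ∈ t
    · simp [hmem]
    · by_cases hr : r = lo + (k : Int)
      · have hidx : (r - lo).toNat = k := by omega
        simp [hmem, hr, hk]
      · have hr' : ¬ (lo + (k : Int) = r) := fun h => hr h.symm
        have hidx : ¬ ((r - lo).toNat = k) := by omega
        simp [hmem, hr', hidx]

-- ===== VERDICT (by name: the statement is the Claim_ definition above) =====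
theorem input_for_consecutive_check_spec : Claim_equal_input_for_consecutive_check := by
  intro cr _ hpre
  unfold Spec_input_for_consecutive_check input_for_consecutive_check input_for_consecutive_check_alt
  obtain ⟨lo, hlo⟩ : ∃ lo, PySem.List.min? cr (fun x => x) = some lo := by
    cases h : PySem.List.min? cr (fun x => x) with
    | none => exact absurd ((PySem.List.min?_eq_none_iff _ _).mp h) hpre
    | some m => exact ⟨m, rfl⟩
  obtain ⟨hi, hhi⟩ : ∃ hi, PySem.List.max? cr (fun x => x) = some hi := by
    cases h : PySem.List.max? cr (fun x => x) with
    | none => exact absurd ((PySem.List.max?_eq_none_iff _ _).mp h) hpre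
    | some m => exact ⟨m, rfl⟩
  rw [hlo, hhi]
  dsimp only [Option.elim_some]
  have hmin : ∀ r ∈ cr, lo ≤ r := fun r hr => PySem.List.min?_isMin hlo r hr
  have hmax : ∀ r ∈ cr, r ≤ hi := fun r hr => PySem.List.max?_isMax hhi r hr
  have hA : (PySem.List.pyRange lo (hi + 1) 1).foldl
      (fun value i => if cr.contains i then value ++ [i] else value ++ [0]) []
      = (PySem.List.pyRange lo (hi + 1) 1).map (fun i => if cr.contains i then i else 0) := by
    have hfun : (fun (value : List Int) (i : Int) =>
        if cr.contains i then value ++ [i] else value ++ [0])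
        = fun value i => value ++ [if cr.contains i then i else 0] := by
      funext v i; by_cases h : i ∈ cr <;> simp [h]
    rw [hfun, pvFoldlSnoc]
    simp
  rw [hA]
  have hlolehi : lo ≤ hi := by
    obtain ⟨x, hx⟩ := List.exists_mem_of_ne_nil cr hpre
    exact le_trans (hmin x hx) (hmax x hx)
  apply List.ext_getElem?
  intro k
  have hlenB : ∀ l res : List Int,
      (l.foldl (fun result r => result.set (r - lo).toNat r) res).length = res.length := by
    intro l
    induction l with
    | nil => simp
    | cons r t ih => intro res; rw [List.foldl_cons, ih]; simp
  by_cases hk : k < (hi + 1 - lo).toNat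
  · rw [List.getElem?_map]
    rw [PySem.List.getElem?_pyRange_one, if_pos hk]
    rw [pvScatterGet lo cr _ hmin k (by simp; omega)]
    by_cases hmem : (lo + (k : Int)) ∈ cr
    · simp [hmem]
    · have hrep : (List.replicate (hi - lo + 1).toNat (0 : Int))[k]? = some 0 := by
        rw [List.getElem?_replicate]; simp; omega
      simp [hmem, hrep]
  · have h1 : ((PySem.List.pyRange lo (hi + 1) 1).map
        (fun i => if cr.contains i then i else 0))[k]? = none := by
      rw [List.getElem?_eq_none_iff]
      simp [PySem.List.length_pyRange_one]; omega
    have h2 : (cr.foldl (fun result r => result.set (r - lo).toNat r)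
        (List.replicate (hi - lo + 1).toNat (0 : Int)))[k]? = none := by
      rw [List.getElem?_eq_none_iff, hlenB]
      simp; omega
    rw [h1, h2]
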